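-- pv_equiv track=rewrite | github.com/ThawaniDev/poslaravelapp | testsprite_tests/local/test_all_routes.py | _fill_path_params
-- ===== SOURCE A (Python) =====
-- PLACEHOLDER_UUID = "00000000-0000-0000-0000-000000000000"
--
-- def _fill_path_params(uri: str) -> str:
--     out = []
--     for part in uri.split("/"):
--         if part.startswith("{") and part.endswith("}"):
--             name = part[1:-1].rstrip("?")
--             if name.endswith("Id") or name in {"id", "page", "perPage", "limit", "offset"}:
--                 out.append("1")
--             elif name.endswith("Key") or name in {"key", "slug", "code", "platform"}:
--                 # routes often constrain these to lowercase letters/dots/underscores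
--                 out.append("placeholder")
--             else:
--                 out.append(PLACEHOLDER_UUID)
--         else:
--             out.append(part)
--     return "/".join(out)
-- ===== SOURCE B (Python) =====
-- PLACEHOLDER_UUID = "00000000-0000-0000-0000-000000000000"
--
--
-- def _subst(seg: str) -> str:
--     if len(seg) >= 2 and seg[0] == "{" and seg[-1] == "}":
--         name = seg[1:-1]
--         while name.endswith("?"):
--             name = name[:-1]
--         if name.endswith("Id") or name in ("id", "page", "perPage", "limit", "offset"):
--             return "1"
--         if name.endswith("Key") or name in ("key", "slug", "code", "platform"):
--             return "placeholder"
--         return PLACEHOLDER_UUID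
--     return seg
--
--
-- def _fill_path_params(uri: str) -> str:
--     # single pass over the characters: flush each segment through _subst at '/'
--     res = []
--     seg = ""
--     for ch in uri:
--         if ch == "/":
--             res.append(_subst(seg))
--             res.append("/")
--             seg = ""
--         else:
--             seg += ch
--     res.append(_subst(seg))
--     return "".join(res)
-- ===== Notes on version B (the rewrite author's own statement) =====
-- stated objective: alternative
-- what changed: Replaced A's split/per-segment-loop/join pipeline with a single character-level pass that accumulates the current segment and flushes it through the substitution at each slash separator; the trailing-question-mark rstrip becomes an explicit trim loop and the endswith/name-set classification cascade is kept.
import Mathlib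
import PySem

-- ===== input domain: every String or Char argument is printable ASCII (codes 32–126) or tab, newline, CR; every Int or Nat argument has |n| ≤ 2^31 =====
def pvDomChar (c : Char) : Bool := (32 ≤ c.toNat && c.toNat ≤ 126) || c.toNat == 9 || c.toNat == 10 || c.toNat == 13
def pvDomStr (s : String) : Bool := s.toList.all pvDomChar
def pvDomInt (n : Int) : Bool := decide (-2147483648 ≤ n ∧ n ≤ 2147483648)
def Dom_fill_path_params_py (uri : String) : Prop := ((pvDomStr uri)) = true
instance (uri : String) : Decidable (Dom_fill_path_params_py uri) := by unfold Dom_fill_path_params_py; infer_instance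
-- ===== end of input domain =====

-- B replaces A's split("/") / per-segment loop / join("/") pipeline with a single
-- character-level pass that flushes each segment at every '/' (objective: alternative
-- decomposition, same cost).

-- ===== PORT A =====
def pvUUID : List Char := "00000000-0000-0000-0000-000000000000".toList

-- exact hand port of Python's name.rstrip("?"): removes every trailing '?' character
def pvRstripA (cs : List Char) : List Char := (cs.reverse.dropWhile (· == '?')).reverse

def pvSubstA (part : List Char) : List Char :=
  if PySem.Chars.startswith part "{".toList && PySem.Chars.endswith part "}".toList then
    let name := pvRstripA (PySem.Chars.slice part (some 1) (some (-1)))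
    if PySem.Chars.endswith name "Id".toList
        || (["id", "page", "perPage", "limit", "offset"].map String.toList).contains name then
      "1".toList
    else if PySem.Chars.endswith name "Key".toList
        || (["key", "slug", "code", "platform"].map String.toList).contains name then
      "placeholder".toList
    else pvUUID
  else part

def fill_path_params_py (uri : String) : String :=
  let out := (PySem.Chars.splitOn uri.toList "/".toList).foldl
    (fun acc part => acc ++ [pvSubstA part]) []
  String.ofList (PySem.Chars.join "/".toList out)

-- ===== PORT B =====
-- Source B's loop 'while name.endswith("?"): name = name[:-1]' as structural recursion
def pvRstripB (cs : List Char) : List Char :=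
  if _h : PySem.Chars.endswith cs "?".toList then pvRstripB cs.dropLast else cs
termination_by cs.length
decreasing_by
  have hne : cs ≠ [] := by
    intro hnil; subst hnil; simp [PySem.Chars.endswith, List.isSuffixOf] at _h
  have : 0 < cs.length := List.length_pos_iff.mpr hne
  simp [List.length_dropLast]; omega

def pvSubstB (seg : List Char) : List Char :=
  if decide (2 ≤ seg.length) && (PySem.List.pyGet? seg 0 == some '{')
      && (PySem.List.pyGet? seg (-1) == some '}') then
    let name := pvRstripB (PySem.Chars.slice seg (some 1) (some (-1)))
    if PySem.Chars.endswith name "Id".toList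
        || name == "id".toList || name == "page".toList || name == "perPage".toList
        || name == "limit".toList || name == "offset".toList then
      "1".toList
    else if PySem.Chars.endswith name "Key".toList
        || name == "key".toList || name == "slug".toList || name == "code".toList
        || name == "platform".toList then
      "placeholder".toList
    else pvUUID
  else seg

def fill_path_params_py_alt (uri : String) : String :=
  let st := uri.toList.foldl
    (fun (st : List Char × List Char) ch =>
      if ch == '/' then (st.1 ++ pvSubstB st.2 ++ ['/'], []) else (st.1, st.2 ++ [ch]))
    ([], [])
  String.ofList (st.1 ++ pvSubstB st.2)

-- ===== PRECONDITION & SPEC =====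
def Spec_fill_path_params_py (uri : String) (out : String) : Prop := out = fill_path_params_py_alt uri
instance (uri : String) (out : String) : Decidable (Spec_fill_path_params_py uri out) := by unfold Spec_fill_path_params_py; infer_instance

-- ===== CLAIM (what is proved, stated in full; the proofs are below) =====
def Claim_equal_fill_path_params_py : Prop := ∀ (uri : String), Dom_fill_path_params_py uri → Spec_fill_path_params_py uri (fill_path_params_py uri)

-- ===== LEMMAS AND PROOFS =====

-- the split A performs, as a plain structural recursion (proof-side spec)
def pvSplit : List Char → List Char → List (List Char)
  | [], pre => [pre]
  | x :: rest, pre => if x = '/' then pre :: pvSplit rest [] else pvSplit rest (pre ++ [x])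

theorem pvEndswith_concat (l : List Char) (x c : Char) :
    PySem.Chars.endswith (l ++ [x]) [c] = (x == c) := by
  induction l with
  | nil =>
    simp [PySem.Chars.endswith, List.isSuffixOf, List.isPrefixOf]
    exact eq_comm
  | cons a t ih => simpa [PySem.Chars.endswith, List.isSuffixOf] using ih

theorem pvEndswith_single (l : List Char) (c : Char) :
    PySem.Chars.endswith l [c] = (l.getLast? == some c) := by
  induction l using List.reverseRecOn with
  | nil => simp [PySem.Chars.endswith, List.isSuffixOf]
  | append_singleton t x ih => simp [pvEndswith_concat]

theorem pvPyGet?_neg_one (l : List Char) : PySem.List.pyGet? l (-1) = l.getLast? := by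
  cases l with
  | nil => simp [PySem.List.pyGet?, PySem.List.pyIdx?]
  | cons a t => simp [PySem.List.pyGet?, PySem.List.pyIdx?, List.getLast?_eq_getElem?]

theorem pvRstripB_rev (rs : List Char) :
    pvRstripB rs.reverse = (rs.dropWhile (· == '?')).reverse := by
  induction rs with
  | nil => simp [pvRstripB, PySem.Chars.endswith, List.isSuffixOf]
  | cons x t ih =>
    rw [pvRstripB]
    by_cases hx : x = '?'
    · subst hx
      have hsuf : PySem.Chars.endswith ('?' :: t).reverse "?".toList = true := by
        simp [pvEndswith_concat]
      rw [dif_pos hsuf]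
      have hdl : ('?' :: t).reverse.dropLast = t.reverse := by simp
      rw [hdl, ih]
      simp [List.dropWhile]
    · have hsuf : PySem.Chars.endswith (t.reverse ++ [x]) ['?'] = false := by
        rw [pvEndswith_concat]; simp [hx]
      rw [dif_neg (by simp [hsuf])]
      have hb : (x == '?') = false := by simp [hx]
      simp [List.dropWhile, hb]

theorem pvRstrip_eq (cs : List Char) : pvRstripB cs = pvRstripA cs := by
  have := pvRstripB_rev cs.reverse
  simpa [pvRstripA] using this

theorem pvMem1 (name : List Char) :
    (["id", "page", "perPage", "limit", "offset"].map String.toList).contains name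
    = (name == "id".toList || name == "page".toList || name == "perPage".toList
        || name == "limit".toList || name == "offset".toList) := by
  simp [Bool.or_assoc, Bool.beq_eq_decide_eq]

theorem pvMem2 (name : List Char) :
    (["key", "slug", "code", "platform"].map String.toList).contains name
    = (name == "key".toList || name == "slug".toList || name == "code".toList
        || name == "platform".toList) := by
  simp [Bool.or_assoc, Bool.beq_eq_decide_eq]

theorem pvCond_eq (part : List Char) :
    (PySem.Chars.startswith part "{".toList && PySem.Chars.endswith part "}".toList)
    = (decide (2 ≤ part.length) && (PySem.List.pyGet? part 0 == some '{')
        && (PySem.List.pyGet? part (-1) == some '}')) := by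
  match part with
  | [] => simp [PySem.Chars.startswith, PySem.Chars.endswith, PySem.List.pyGet?, PySem.List.pyIdx?]
  | [a] =>
    by_cases ha : a = '{'
    · subst ha
      simp [PySem.Chars.startswith, PySem.Chars.endswith, List.isSuffixOf, List.isPrefixOf]
    · simp [PySem.Chars.startswith, List.isPrefixOf]
      intro h; exact absurd h.symm ha
  | a :: b :: t =>
    simp [PySem.Chars.startswith, List.isPrefixOf, pvEndswith_single,
      pvPyGet?_neg_one, Bool.beq_eq_decide_eq, eq_comm]

theorem pvSubst_eq (part : List Char) : pvSubstA part = pvSubstB part := by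
  unfold pvSubstA pvSubstB
  simp only [pvCond_eq, pvRstrip_eq, pvMem1, pvMem2, Bool.or_assoc]

theorem pvSplitOn_go (fuel : Nat) : ∀ (l cur : List Char) (acc : List (List Char)),
    l.length ≤ fuel →
    PySem.Chars.splitOn.go "/".toList fuel l cur acc = acc.reverse ++ pvSplit l cur.reverse := by
  induction fuel with
  | zero =>
    intro l cur acc h
    have : l = [] := List.length_eq_zero_iff.mp (Nat.le_zero.mp h)
    subst this
    simp [PySem.Chars.splitOn.go, pvSplit]
  | succ f ih =>
    intro l cur acc h
    match l with
    | [] => simp [PySem.Chars.splitOn.go, pvSplit]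
    | x :: rest =>
      rw [PySem.Chars.splitOn.go]
      by_cases hx : x = '/'
      · subst hx
        have hpre : "/".toList.isPrefixOf ('/' :: rest) = true := by
          simp [List.isPrefixOf]
        simp only [hpre, if_true]
        rw [ih _ _ _ (by simpa using Nat.le_of_succ_le_succ h)]
        simp [pvSplit]
      · have hpre : "/".toList.isPrefixOf (x :: rest) = false := by
          simp [List.isPrefixOf]
          exact fun h => hx h.symm
        simp only [hpre, Bool.false_eq_true, if_false]
        rw [ih _ _ _ (by simpa using Nat.le_of_succ_le_succ h)]
        have hsp : pvSplit (x :: rest) cur.reverse = pvSplit rest (cur.reverse ++ [x]) := by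
          simp only [pvSplit]; rw [if_neg hx]
        rw [hsp]
        simp

theorem pvSplitOn_eq (cs : List Char) :
    PySem.Chars.splitOn cs "/".toList = pvSplit cs [] := by
  unfold PySem.Chars.splitOn
  rw [pvSplitOn_go (cs.length + 1) cs [] [] (by omega)]
  simp

theorem pvFoldl_append {α β : Type} (f : α → β) (l : List α) (acc : List β) :
    l.foldl (fun a x => a ++ [f x]) acc = acc ++ l.map f := by
  induction l generalizing acc with
  | nil => simp
  | cons x t ih => simp [ih]

theorem pvSplit_ne_nil (l pre : List Char) : pvSplit l pre ≠ [] := by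
  induction l generalizing pre with
  | nil => simp [pvSplit]
  | cons x t ih =>
    by_cases hx : x = '/' <;> simp [pvSplit, hx, ih]

theorem pvJoin_cons (p : List Char) (L : List (List Char)) (h : L ≠ []) :
    PySem.Chars.join "/".toList (p :: L) = p ++ '/' :: PySem.Chars.join "/".toList L := by
  match L with
  | [] => exact absurd rfl h
  | q :: rest => rw [PySem.Chars.join_cons_cons]; simp

theorem pvScan_eq (cs : List Char) : ∀ (acc pre : List Char),
    (cs.foldl
        (fun (st : List Char × List Char) ch =>
          if ch == '/' then (st.1 ++ pvSubstB st.2 ++ ['/'], []) else (st.1, st.2 ++ [ch]))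
        (acc, pre)).1
      ++ pvSubstB (cs.foldl
        (fun (st : List Char × List Char) ch =>
          if ch == '/' then (st.1 ++ pvSubstB st.2 ++ ['/'], []) else (st.1, st.2 ++ [ch]))
        (acc, pre)).2
    = acc ++ PySem.Chars.join "/".toList ((pvSplit cs pre).map pvSubstB) := by
  induction cs with
  | nil => intro acc pre; simp [pvSplit, PySem.Chars.join_singleton]
  | cons x t ih =>
    intro acc pre
    by_cases hx : x = '/'
    · subst hx
      simp only [List.foldl_cons]
      rw [if_pos (show (('/' : Char) == '/') = true from rfl)]
      rw [ih]
      have hne : (pvSplit t []).map pvSubstB ≠ [] := by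
        simp [pvSplit_ne_nil]
      rw [show pvSplit ('/' :: t) pre = pre :: pvSplit t [] from by simp [pvSplit]]
      rw [List.map_cons, pvJoin_cons _ _ hne]
      simp
    · simp only [List.foldl_cons]
      rw [if_neg (show ¬ ((x == '/') = true) from by simp [hx])]
      rw [ih]
      rw [show pvSplit (x :: t) pre = pvSplit t (pre ++ [x]) from by
        simp only [pvSplit]; rw [if_neg hx]]

-- ===== VERDICT (by name: the statement is the Claim_ definition above) =====
theorem fill_path_params_py_spec : Claim_equal_fill_path_params_py := by
  intro uri _
  show fill_path_params_py uri = fill_path_params_py_alt uri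
  show String.ofList (PySem.Chars.join "/".toList
      ((PySem.Chars.splitOn uri.toList "/".toList).foldl (fun acc part => acc ++ [pvSubstA part]) []))
    = String.ofList ((uri.toList.foldl
        (fun (st : List Char × List Char) ch =>
          if ch == '/' then (st.1 ++ pvSubstB st.2 ++ ['/'], []) else (st.1, st.2 ++ [ch]))
        ([], [])).1
      ++ pvSubstB (uri.toList.foldl
        (fun (st : List Char × List Char) ch =>
          if ch == '/' then (st.1 ++ pvSubstB st.2 ++ ['/'], []) else (st.1, st.2 ++ [ch]))
        ([], [])).2)
  rw [pvSplitOn_eq, pvFoldl_append, pvScan_eq]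
  simp only [List.nil_append]
  congr 2
  exact List.map_congr_left (fun p _ => pvSubst_eq p)
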